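-- pv_equiv track=rewrite | github.com/pranavprajapati/culinary_convo | utilities.py | replace_ingredients
-- ===== SOURCE A (Python) =====
-- def replace_ingredients(output, ingredients, replacement_list):
--     # Iterate through the replacement list
--     for initial_ingredient in replacement_list:
--         # Check if the initial ingredient is mentioned in any of the sentences in the output
--         for sentence in output:
--             if initial_ingredient.lower() in sentence.lower():
--                 # Extract the replacement ingredient from the sentence
--                 replacement = sentence.split(":")[1].split(".")[0].strip().lower()
--                 if 'could be' in replacement:
--                     replacement = replacement.split('could be')[1].strip()
--                 elif 'would be' in replacement:
--                     replacement = replacement.split('would be')[1].strip()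
--                 # Replace the initial ingredient with the replacement ingredient in the original ingredients list
--                 ingredients = [ingredient.lower().replace(initial_ingredient.lower(), replacement) for ingredient in ingredients]
--                 break  # Move to the next initial ingredient
--     return ingredients
-- ===== SOURCE B (Python) =====
-- def _parse(sentence):
--     replacement = sentence.split(":")[1].split(".")[0].strip().lower()
--     if 'could be' in replacement:
--         replacement = replacement.split('could be')[1].strip()
--     elif 'would be' in replacement:
--         replacement = replacement.split('would be')[1].strip()
--     return replacement
--
--
-- def replace_ingredients(output, ingredients, replacement_list):
--     # Sentence-major pass: walk the output ONCE; each sentence is parsed at most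
--     # once and claims every still-unmatched initial it mentions (first sentence
--     # wins). A, by contrast, rescans the output from the top for every initial.
--     pending = []
--     for r in replacement_list:
--         rl = r.lower()
--         if rl not in pending:
--             pending.append(rl)
--     mapping = {}
--     for sentence in output:
--         if not pending:
--             break
--         s_low = sentence.lower()
--         hit = [ini for ini in pending if ini in s_low]
--         if hit:
--             repl = _parse(sentence)
--             for ini in hit:
--                 mapping[ini] = repl
--             pending = [ini for ini in pending if ini not in hit]
--     # Apply pass: each ingredient goes through the replacement_list order,
--     # skipping initials no sentence mentioned.
--     result = []
--     for ing in ingredients: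
--         cur = ing
--         for r in replacement_list:
--             rl = r.lower()
--             if rl in mapping:
--                 cur = cur.lower().replace(rl, mapping[rl])
--         result.append(cur)
--     return result
-- ===== Notes on version B (the rewrite author's own statement) =====
-- stated objective: alternative
-- what changed: B inverts the loop nesting: a single sentence-major pass over the output in which each sentence is parsed at most once and claims every still-unmatched initial it mentions (maintaining a shrinking pending worklist and a dict, with early exit when the worklist empties), followed by an apply pass over the ingredients; A instead rescans the whole output from the top for each initial and rebuilds the entire ingredients list per initial.
import Mathlib
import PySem

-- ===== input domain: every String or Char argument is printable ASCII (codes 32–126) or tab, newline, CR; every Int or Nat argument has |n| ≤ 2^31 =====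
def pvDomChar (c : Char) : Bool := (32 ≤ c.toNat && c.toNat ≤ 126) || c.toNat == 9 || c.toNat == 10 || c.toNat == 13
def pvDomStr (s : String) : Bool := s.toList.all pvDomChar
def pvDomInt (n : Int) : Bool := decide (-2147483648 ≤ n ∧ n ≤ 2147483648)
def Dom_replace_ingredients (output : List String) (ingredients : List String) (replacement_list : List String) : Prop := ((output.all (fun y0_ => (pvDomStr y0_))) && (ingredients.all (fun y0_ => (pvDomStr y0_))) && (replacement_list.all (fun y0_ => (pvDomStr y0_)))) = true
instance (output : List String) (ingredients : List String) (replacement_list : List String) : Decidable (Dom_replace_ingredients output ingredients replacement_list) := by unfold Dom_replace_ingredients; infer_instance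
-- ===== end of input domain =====

-- B inverts the loop nesting: one sentence-major pass parses each sentence at most once and
-- lets it claim every still-unmatched initial (pending worklist + dict, early exit), then an
-- apply pass over the ingredients; same cost, objective: alternative algorithm.

-- ===== PORT A =====
-- loop body of A's outer for-loop (the inner 'for sentence … break' is first-match search)
def pvAStep (output : List String) (ingredients : List String) (initial_ingredient : String) : List String :=
  match output.find? (fun sentence => PySem.Str.isIn (PySem.Str.lower initial_ingredient) (PySem.Str.lower sentence)) with
  | none => ingredients
  | some sentence =>
      -- sentence.split(":")[1] raises IndexError when sentence has no ':'; that input is outside Pre_ (getD "" is unreachable inside Pre_)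
      let t1 := (PySem.List.pyGet? ((PySem.Str.split? sentence ":").getD []) 1).getD ""
      let t2 := (PySem.List.pyGet? ((PySem.Str.split? t1 ".").getD []) 0).getD ""
      let replacement := PySem.Str.lower (PySem.Str.strip t2)
      let replacement :=
        if PySem.Str.isIn "could be" replacement then
          PySem.Str.strip ((PySem.List.pyGet? ((PySem.Str.split? replacement "could be").getD []) 1).getD "")
        else if PySem.Str.isIn "would be" replacement then
          PySem.Str.strip ((PySem.List.pyGet? ((PySem.Str.split? replacement "would be").getD []) 1).getD "")
        else replacement
      ingredients.map (fun ingredient => PySem.Str.replace (PySem.Str.lower ingredient) (PySem.Str.lower initial_ingredient) replacement)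

def replace_ingredients (output : List String) (ingredients : List String) (replacement_list : List String) : List String :=
  replacement_list.foldl (pvAStep output) ingredients

-- ===== PORT B =====
-- Source B's _parse
def pvParse (sentence : String) : String :=
  let t1 := (PySem.List.pyGet? ((PySem.Str.split? sentence ":").getD []) 1).getD ""
  let t2 := (PySem.List.pyGet? ((PySem.Str.split? t1 ".").getD []) 0).getD ""
  let replacement := PySem.Str.lower (PySem.Str.strip t2)
  if PySem.Str.isIn "could be" replacement then
    PySem.Str.strip ((PySem.List.pyGet? ((PySem.Str.split? replacement "could be").getD []) 1).getD "")
  else if PySem.Str.isIn "would be" replacement then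
    PySem.Str.strip ((PySem.List.pyGet? ((PySem.Str.split? replacement "would be").getD []) 1).getD "")
  else replacement

-- Source B's pending worklist: distinct lowered initials in first-occurrence order
def pvPending (replacement_list : List String) : List String :=
  replacement_list.foldl
    (fun acc r =>
      let rl := PySem.Str.lower r
      if acc.contains rl then acc else acc ++ [rl]) []

-- Source B's sentence-major scan: each sentence claims every still-pending initial it mentions
def pvScan : List String → List String → PySem.Dict String String → PySem.Dict String String
  | [], _, m => m
  | sentence :: rest, pending, m =>
      if pending.isEmpty then m
      else
        let s_low := PySem.Str.lower sentence
        let hit := pending.filter (fun ini => PySem.Str.isIn ini s_low)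
        if hit.isEmpty then pvScan rest pending m
        else
          let repl := pvParse sentence
          let m' := hit.foldl (fun m ini => m.insert ini repl) m
          pvScan rest (pending.filter (fun ini => !hit.contains ini)) m'

def replace_ingredients_alt (output : List String) (ingredients : List String) (replacement_list : List String) : List String :=
  let mapping := pvScan output (pvPending replacement_list) PySem.Dict.empty
  ingredients.map (fun ing =>
    replacement_list.foldl
      (fun cur r =>
        let rl := PySem.Str.lower r
        match mapping.get? rl with
        | some repl => PySem.Str.replace (PySem.Str.lower cur) rl repl
        | none => cur) ing)

-- ===== PRECONDITION & SPEC =====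
-- Pre_ excludes exactly the inputs where Python A raises IndexError: some replacement's
-- first matching sentence contains no ':', so sentence.split(":")[1] is out of range.
def Pre_replace_ingredients (output : List String) (ingredients : List String) (replacement_list : List String) : Prop :=
  ∀ r ∈ replacement_list,
    ((output.find? (fun s => PySem.Str.isIn (PySem.Str.lower r) (PySem.Str.lower s))).all
      (fun s => PySem.Str.isIn ":" s)) = true
instance (output : List String) (ingredients : List String) (replacement_list : List String) : Decidable (Pre_replace_ingredients output ingredients replacement_list) := by unfold Pre_replace_ingredients; infer_instance
def pvWitness_replace_ingredients : List String × List String × List String :=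
  (["Use butter: it could be margarine."], ["Butter cookies"], ["butter"])

def Spec_replace_ingredients (output : List String) (ingredients : List String) (replacement_list : List String) (out : List String) : Prop := out = replace_ingredients_alt output ingredients replacement_list
instance (output : List String) (ingredients : List String) (replacement_list : List String) (out : List String) : Decidable (Spec_replace_ingredients output ingredients replacement_list out) := by unfold Spec_replace_ingredients; infer_instance

-- ===== CLAIM (what is proved, stated in full; the proofs are below) =====
def Claim_equal_replace_ingredients : Prop := ∀ (output : List String) (ingredients : List String) (replacement_list : List String), Dom_replace_ingredients output ingredients replacement_list → Pre_replace_ingredients output ingredients replacement_list → Spec_replace_ingredients output ingredients replacement_list (replace_ingredients output ingredients replacement_list)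

-- ===== LEMMAS AND PROOFS =====
-- what one initial contributes, as a per-ingredient step (common form of both sides)
def pvChainStep (output : List String) (cur r : String) : String :=
  match output.find? (fun s => PySem.Str.isIn (PySem.Str.lower r) (PySem.Str.lower s)) with
  | none => cur
  | some s => PySem.Str.replace (PySem.Str.lower cur) (PySem.Str.lower r) (pvParse s)

lemma pvAStep_eq (output : List String) (ings : List String) (r : String) :
    pvAStep output ings r = ings.map (fun ing => pvChainStep output ing r) := by
  unfold pvAStep pvChainStep
  cases h : List.find? (fun s => PySem.Str.isIn (PySem.Str.lower r) (PySem.Str.lower s)) output with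
  | none => simp
  | some s => simp only [pvParse]

lemma pvA_fold_eq (output : List String) (rs : List String) (ings : List String) :
    List.foldl (pvAStep output) ings rs
      = ings.map (fun ing => rs.foldl (pvChainStep output) ing) := by
  induction rs generalizing ings with
  | nil => simp
  | cons r rs ih =>
      rw [List.foldl_cons, pvAStep_eq, ih, List.map_map]
      rfl

lemma get?_foldl_insert (l : List String) (v : String) (m : PySem.Dict String String) (k : String) :
    (l.foldl (fun m ini => m.insert ini v) m).get? k
      = if l.contains k then some v else m.get? k := by
  induction l generalizing m with
  | nil => simp
  | cons i l ih =>
      rw [List.foldl_cons, ih]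
      by_cases hk : k = i
      · subst hk
        by_cases hl : l.contains k <;> simp [PySem.Dict.get?_insert_self]
      · simp only [List.contains_cons]
        rw [PySem.Dict.get?_insert_of_ne _ _ hk]
        have : (k == i) = false := by simp [hk]
        simp [this]

-- the scan invariant: after the pass, a still-pending key reads off the first matching
-- sentence of the REMAINING output; a non-pending key is untouched
lemma pvScan_get (out : List String) (pending : List String) (m : PySem.Dict String String) (ini : String) :
    (pvScan out pending m).get? ini
      = if pending.contains ini then
          match out.find? (fun s => PySem.Str.isIn ini (PySem.Str.lower s)) with
          | some s => some (pvParse s)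
          | none => m.get? ini
        else m.get? ini := by
  induction out generalizing pending m with
  | nil => simp [pvScan]
  | cons s rest ih =>
      rw [pvScan]
      by_cases hp : pending.isEmpty
      · rw [List.isEmpty_iff] at hp
        subst hp
        simp
      · rw [if_neg hp]
        set hitP : String → Bool := fun i => PySem.Str.isIn i (PySem.Str.lower s) with hhitP
        by_cases hhit : (pending.filter hitP).isEmpty
        · rw [if_pos hhit, ih]
          by_cases hmem : pending.contains ini
          · have hini : ¬ hitP ini = true := by
              intro hc
              have : ini ∈ pending.filter hitP := by
                rw [List.mem_filter]
                exact ⟨by simpa using hmem, hc⟩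
              rw [List.isEmpty_iff] at hhit
              simp [hhit] at this
            rw [List.find?_cons_of_neg (by simpa [hhitP] using hini)]
          · have hnm : ini ∉ pending := by simpa using hmem
            simp [hnm]
        · rw [if_neg hhit, ih, get?_foldl_insert]
          by_cases hmem : ini ∈ pending
          · by_cases hini : hitP ini = true
            · -- claimed by this sentence
              have hini2 : PySem.Chars.isIn ini.toList (PySem.Chars.lower s.toList) = true := by
                simpa [hhitP] using hini
              rw [List.find?_cons_of_pos (by simpa [hhitP] using hini)]
              simp [hini2, List.contains_eq_mem]
            · -- not mentioned here: stays pending, dict entry unchanged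
              have hini2 : PySem.Chars.isIn ini.toList (PySem.Chars.lower s.toList) = false := by
                simpa [hhitP] using hini
              rw [List.find?_cons_of_neg (by simpa [hhitP] using hini)]
              simp [hini2]
          · -- never pending: untouched
            simp [hmem]

-- every initial of the replacement list (lowered) is in the worklist
lemma pvPending_mem (rs : List String) (acc : List String) (x : String) :
    x ∈ rs.foldl (fun acc r =>
        let rl := PySem.Str.lower r
        if acc.contains rl then acc else acc ++ [rl]) acc
      ↔ x ∈ acc ∨ ∃ r ∈ rs, PySem.Str.lower r = x := by
  induction rs generalizing acc with
  | nil => simp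
  | cons r rs ih =>
      rw [List.foldl_cons, ih]
      by_cases hc : PySem.Str.lower r ∈ acc
      · simp only [List.contains_eq_mem, hc, decide_true, if_true, List.mem_cons]
        constructor
        · rintro (h | ⟨r', hr', hx⟩)
          · exact Or.inl h
          · exact Or.inr ⟨r', Or.inr hr', hx⟩
        · rintro (h | ⟨r', hr' | hr', hx⟩)
          · exact Or.inl h
          · subst hr'; subst hx; exact Or.inl hc
          · exact Or.inr ⟨r', hr', hx⟩
      · simp only [List.contains_eq_mem, hc, decide_false, Bool.false_eq_true, if_false,
          List.mem_append, List.mem_cons]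
        constructor
        · rintro ((h | (h | h)) | ⟨r', hr', hx⟩)
          · exact Or.inl h
          · exact Or.inr ⟨r, Or.inl rfl, h.symm⟩
          · cases h
          · exact Or.inr ⟨r', Or.inr hr', hx⟩
        · rintro (h | ⟨r', hr' | hr', hx⟩)
          · exact Or.inl (Or.inl h)
          · subst hr'; subst hx; exact Or.inl (Or.inr (Or.inl rfl))
          · exact Or.inr ⟨r', hr', hx⟩

lemma pvPending_contains (rs : List String) (r : String) (h : r ∈ rs) :
    (pvPending rs).contains (PySem.Str.lower r) = true := by
  unfold pvPending
  have hm := (pvPending_mem rs [] (PySem.Str.lower r)).mpr (Or.inr ⟨r, h, rfl⟩)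
  simpa [List.contains_eq_mem] using hm

-- the mapping lookup for a listed initial IS the first-match parse
lemma pvMapping_get (output : List String) (rs : List String) (r : String) (h : r ∈ rs) :
    (pvScan output (pvPending rs) PySem.Dict.empty).get? (PySem.Str.lower r)
      = (output.find? (fun s => PySem.Str.isIn (PySem.Str.lower r) (PySem.Str.lower s))).map pvParse := by
  rw [pvScan_get, if_pos (by simpa using pvPending_contains rs r h)]
  cases output.find? (fun s => PySem.Str.isIn (PySem.Str.lower r) (PySem.Str.lower s)) with
  | none => rfl
  | some s => simp

-- ===== VERDICT (by name: the statement is the Claim_ definition above) =====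
theorem replace_ingredients_spec : Claim_equal_replace_ingredients := by
  intro output ingredients replacement_list _ _
  unfold Spec_replace_ingredients replace_ingredients replace_ingredients_alt
  rw [pvA_fold_eq]
  refine List.map_congr_left (fun ing _ => ?_)
  refine PySem.List.foldl_congr_mem' _ _ _ _ (fun r hr cur => ?_)
  rw [pvChainStep]
  have hm := pvMapping_get output replacement_list r hr
  cases hf : output.find? (fun s => PySem.Str.isIn (PySem.Str.lower r) (PySem.Str.lower s)) with
  | none => rw [hf] at hm; simp [hm]
  | some s => rw [hf] at hm; simp [hm]
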